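-- pv_equiv track=rewrite | github.com/kevin-v96/codesignal-arcade | Core/28. lineUp.py | solution
-- ===== SOURCE A (Python) =====
-- def solution(commands):
--     count = 0
--     smartStudent = 0
--     dumbStudent = 0
--
--     for c in commands:
--         if c == 'L' or c == 'R':
--             smartStudent -= 1
--             dumbStudent += 1
--         elif c == 'A':
--             smartStudent += 2
--             dumbStudent += 2
--
--         #modulo them to keep them in check
--         if smartStudent < 0:
--             smartStudent += 4
--         else:
--             smartStudent %= 4
--
--         if dumbStudent < 0:
--             dumbStudent += 4
--         else:
--             dumbStudent %= 4
--
--         if smartStudent == dumbStudent: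
--             count += 1
--
--     return count
-- ===== SOURCE B (Python) =====
-- def solution(commands):
--     # parity insight: the two students face the same direction exactly when
--     # an even number of L/R commands has been executed so far
--     count = 0
--     lr = 0
--     for c in commands:
--         if c == 'L' or c == 'R':
--             lr = 1 - lr
--         if lr == 0:
--             count += 1
--     return count
-- ===== Notes on version B (the rewrite author's own statement) =====
-- stated objective: simpler
-- what changed: Replaces the simulation of both students' mod-4 orientations with a single L/R parity bit: they match exactly when the number of L/R commands seen is even.
import Mathlib
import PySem

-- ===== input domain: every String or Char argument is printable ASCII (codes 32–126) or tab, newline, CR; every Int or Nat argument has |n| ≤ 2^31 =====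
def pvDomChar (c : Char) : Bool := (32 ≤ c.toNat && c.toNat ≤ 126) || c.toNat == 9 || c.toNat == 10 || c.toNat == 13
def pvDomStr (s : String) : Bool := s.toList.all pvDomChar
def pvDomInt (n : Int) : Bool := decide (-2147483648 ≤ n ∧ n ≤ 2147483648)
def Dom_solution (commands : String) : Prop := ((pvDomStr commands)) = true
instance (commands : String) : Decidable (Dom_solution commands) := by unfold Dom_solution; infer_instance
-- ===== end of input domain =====

-- B replaces the simulation of both students' mod-4 orientations with a single L/R parity bit (simpler).


-- ===== PORT A =====
-- one iteration of A's loop: state = (count, smartStudent, dumbStudent)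
def solStepA (st : Int × Int × Int) (c : Char) : Int × Int × Int :=
  let count := st.1
  let smart0 := st.2.1
  let dumb0 := st.2.2
  let smart1 := if c = 'L' ∨ c = 'R' then smart0 - 1 else if c = 'A' then smart0 + 2 else smart0
  let dumb1 := if c = 'L' ∨ c = 'R' then dumb0 + 1 else if c = 'A' then dumb0 + 2 else dumb0
  let smart2 := if smart1 < 0 then smart1 + 4 else PySem.Int.mod smart1 4
  let dumb2 := if dumb1 < 0 then dumb1 + 4 else PySem.Int.mod dumb1 4
  let count' := if smart2 = dumb2 then count + 1 else count
  (count', smart2, dumb2)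

def solution (commands : String) : Int :=
  (commands.toList.foldl solStepA (0, 0, 0)).1

-- ===== PORT B =====
-- one iteration of B's loop: state = (count, lr parity bit)
def solStepB (st : Int × Int) (c : Char) : Int × Int :=
  let lr := if c = 'L' ∨ c = 'R' then 1 - st.2 else st.2
  let count := if lr = 0 then st.1 + 1 else st.1
  (count, lr)

def solution_alt (commands : String) : Int :=
  (commands.toList.foldl solStepB (0, 0)).1

-- ===== PRECONDITION & SPEC =====
def Spec_solution (commands : String) (out : Int) : Prop := out = solution_alt commands
instance (commands : String) (out : Int) : Decidable (Spec_solution commands out) := by unfold Spec_solution; infer_instance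

-- ===== CLAIM (what is proved, stated in full; the proofs are below) =====
def Claim_equal_solution : Prop := ∀ (commands : String), Dom_solution commands → Spec_solution commands (solution commands)

-- ===== LEMMAS AND PROOFS =====

-- folding the mod-4 correction of A into a single Int emod
theorem solFix_eq (x : Int) (hx : -4 ≤ x) :
    (if x < 0 then x + 4 else PySem.Int.mod x 4) = x % 4 := by
  split_ifs with h
  · omega
  · rw [PySem.Int.mod_eq_emod_of_pos (by norm_num)]

-- loop invariant: both mod-4 orientations stay in [0,4), their difference is even,
-- they are equal exactly when the parity bit is 0, and the counts coincide
theorem solution_loop (l : List Char) (count smart dumb lr : Int)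
    (h1 : 0 ≤ smart ∧ smart < 4) (h2 : 0 ≤ dumb ∧ dumb < 4)
    (h3 : (dumb - smart) % 2 = 0) (h4 : lr = 0 ∨ lr = 1)
    (h5 : smart = dumb ↔ lr = 0) :
    (l.foldl solStepA (count, smart, dumb)).1 = (l.foldl solStepB (count, lr)).1 := by
  induction l generalizing count smart dumb lr with
  | nil => rfl
  | cons c rest ih =>
    simp only [List.foldl_cons]
    by_cases hLR : c = 'L' ∨ c = 'R'
    · simp only [solStepA, solStepB, hLR, if_true]
      rw [solFix_eq (smart - 1) (by omega), solFix_eq (dumb + 1) (by omega)]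
      have hc : ((smart - 1) % 4 = (dumb + 1) % 4) ↔ (1 - lr = 0) := by omega
      rw [if_congr hc rfl rfl]
      exact ih _ _ _ _ (by omega) (by omega) (by omega) (by omega) (by omega)
    · by_cases hA : c = 'A'
      · simp only [solStepA, solStepB, hA, show ¬('A' = 'L' ∨ 'A' = 'R') by decide, if_false, if_true]
        rw [solFix_eq (smart + 2) (by omega), solFix_eq (dumb + 2) (by omega)]
        have hc : ((smart + 2) % 4 = (dumb + 2) % 4) ↔ (lr = 0) := by omega
        rw [if_congr hc rfl rfl]
        exact ih _ _ _ _ (by omega) (by omega) (by omega) h4 (by omega)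
      · simp only [solStepA, solStepB, hLR, hA, if_false]
        rw [solFix_eq smart (by omega), solFix_eq dumb (by omega)]
        have hs : smart % 4 = smart := by omega
        have hd : dumb % 4 = dumb := by omega
        rw [hs, hd, if_congr h5 rfl rfl]
        exact ih _ _ _ _ h1 h2 h3 h4 h5

-- ===== VERDICT (by name: the statement is the Claim_ definition above) =====
theorem solution_spec : Claim_equal_solution := by
  intro commands _
  unfold Spec_solution solution solution_alt
  exact solution_loop _ _ _ _ _ ⟨le_refl 0, by norm_num⟩ ⟨le_refl 0, by norm_num⟩ (by norm_num) (Or.inl rfl) (by simp)
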